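-- pv_equiv track=rewrite | github.com/niana0/vendor-risk-review-tool | src/risk_summary_generator.py | _list_sources
-- ===== SOURCE A (Python) =====
-- from typing import Dict, List, Any
--
-- def _list_sources(evidence_library: List[Dict[str, Any]]) -> str:
--     """List unique document sources from the evidence library."""
--     seen = set()
--     sources = []
--     for ev in evidence_library:
--         # Extract just the filename (before the first parenthesis)
--         source = ev.get("source", "")
--         doc_name = source.split("(")[0].strip()
--         if doc_name and doc_name not in seen:
--             seen.add(doc_name)
--             sources.append(f"- {doc_name}")
--     return "\n".join(sources) if sources else "- No documents listed"
-- ===== SOURCE B (Python) =====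
-- def _list_sources(evidence_library):
--     """List unique document sources from the evidence library."""
--     def go(evs):
--         if not evs:
--             return []
--         name = evs[0].get("source", "").split("(")[0].strip()
--         rest = go(evs[1:])
--         if not name:
--             return rest
--         return [name] + [r for r in rest if r != name]
--
--     unique = go(evidence_library)
--     if not unique:
--         return "- No documents listed"
--     return "\n".join("- " + n for n in unique)
-- ===== Notes on version B (the rewrite author's own statement) =====
-- stated objective: alternative
-- what changed: Replaces A's iterative seen-set/append loop with a recursive removal-based dedup: recurse on the tail, then prepend the head's cleaned name and delete its later duplicates from the recursive result (no auxiliary set, no membership guard).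
import Mathlib
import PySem

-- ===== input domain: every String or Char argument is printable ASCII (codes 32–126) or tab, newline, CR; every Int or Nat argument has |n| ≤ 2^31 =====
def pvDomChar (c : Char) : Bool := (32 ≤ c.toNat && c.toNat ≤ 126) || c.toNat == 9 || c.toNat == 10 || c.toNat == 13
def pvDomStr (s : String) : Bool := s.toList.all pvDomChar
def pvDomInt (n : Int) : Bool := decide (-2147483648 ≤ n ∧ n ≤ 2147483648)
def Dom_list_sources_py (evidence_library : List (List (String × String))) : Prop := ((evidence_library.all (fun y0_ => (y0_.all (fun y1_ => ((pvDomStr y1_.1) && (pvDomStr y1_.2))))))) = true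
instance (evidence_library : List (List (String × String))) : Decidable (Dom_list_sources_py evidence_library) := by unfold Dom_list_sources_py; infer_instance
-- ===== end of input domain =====

-- B replaces A's iterative seen-set/append loop with a recursive removal-based dedup
-- (recurse on the tail, prepend the head's name, delete its later duplicates); same results, alternative structure.

-- ===== PORT A =====
def list_sources_py (evidence_library : List (List (String × String))) : String :=
  let st := evidence_library.foldl
    (fun (st : PySem.Set String × List String) ev =>
      let source := PySem.Dict.getD (PySem.Dict.mk ev) "source" ""
      let doc_name := PySem.Str.strip ((((PySem.Str.split? source "(").getD [])).headD "")
      if doc_name ≠ "" ∧ doc_name ∉ st.1 then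
        (PySem.Set.add st.1 doc_name, st.2 ++ ["- " ++ doc_name])
      else st)
    (PySem.Set.empty, [])
  if st.2 ≠ [] then PySem.Str.join "\n" st.2 else "- No documents listed"

-- ===== PORT B =====
-- B's inner recursive helper go: head's cleaned name prepended, its duplicates removed from the recursive result
def pvGoB : List (List (String × String)) → List String
  | [] => []
  | ev :: evs =>
      let name := PySem.Str.strip ((((PySem.Str.split? (PySem.Dict.getD (PySem.Dict.mk ev) "source" "") "(").getD [])).headD "")
      let rest := pvGoB evs
      if name = "" then rest
      else name :: rest.filter (fun r => r ≠ name)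

def list_sources_py_alt (evidence_library : List (List (String × String))) : String :=
  let unique := pvGoB evidence_library
  if unique = [] then "- No documents listed"
  else PySem.Str.join "\n" (unique.map (fun n => "- " ++ n))

-- ===== PRECONDITION & SPEC =====
def Spec_list_sources_py (evidence_library : List (List (String × String))) (out : String) : Prop := out = list_sources_py_alt evidence_library
instance (evidence_library : List (List (String × String))) (out : String) : Decidable (Spec_list_sources_py evidence_library out) := by unfold Spec_list_sources_py; infer_instance

-- ===== CLAIM (what is proved, stated in full; the proofs are below) =====
def Claim_equal_list_sources_py : Prop := ∀ (evidence_library : List (List (String × String))), Dom_list_sources_py evidence_library → Spec_list_sources_py evidence_library (list_sources_py evidence_library)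

-- ===== LEMMAS AND PROOFS =====

-- the cleaned name both ports extract from one evidence entry
def pvNm (ev : List (String × String)) : String :=
  PySem.Str.strip ((((PySem.Str.split? (PySem.Dict.getD (PySem.Dict.mk ev) "source" "") "(").getD [])).headD "")

-- A's loop body, as a named function (definitionally equal to the lambda in the port)
def pvStepA (st : PySem.Set String × List String) (ev : List (String × String)) :
    PySem.Set String × List String :=
  if pvNm ev ≠ "" ∧ pvNm ev ∉ st.1 then (PySem.Set.add st.1 (pvNm ev), st.2 ++ ["- " ++ pvNm ev])
  else st

-- A's loop, characterised: the output list is the deduped filtered names (new w.r.t. s), formatted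
set_option maxHeartbeats 1000000 in
theorem loopA_char (lib : List (List (String × String))) (s : PySem.Set String) (out : List String) :
    lib.foldl pvStepA (s, out)
    = (PySem.Set.update s ((lib.map pvNm).filter (fun n => n ≠ "")),
       out ++ ((PySem.List.dedup ((lib.map pvNm).filter (fun n => n ≠ ""))).filter
                 (fun y => y ∉ s)).map (fun n => "- " ++ n)) := by
  induction lib generalizing s out with
  | nil =>
      simp [PySem.Set.update, PySem.List.dedup_eq_ofList, PySem.Set.ofList]
  | cons ev rest ih =>
      simp only [List.foldl_cons, List.map_cons]
      by_cases h0 : pvNm ev = ""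
      · -- empty name: the entry is skipped on both sides
        rw [show pvStepA (s, out) ev = (s, out) by simp [pvStepA, h0]]
        rw [ih]
        simp [h0]
      · by_cases h1 : pvNm ev ∈ s
        · -- duplicate (already seen): skipped by A, removed by dedup/filter on the other side
          rw [show pvStepA (s, out) ev = (s, out) by simp [pvStepA, h1]]
          rw [ih]
          have hf : ((pvNm ev :: (rest.map pvNm)).filter (fun n => n ≠ ""))
              = pvNm ev :: ((rest.map pvNm).filter (fun n => n ≠ "")) := by
            simp [h0]
          rw [hf]
          refine Prod.ext ?_ ?_
          · simp only
            rw [PySem.Set.update_cons, PySem.Set.add_of_mem h1]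
          · simp only
            rw [PySem.List.dedup_eq_ofList, PySem.List.dedup_eq_ofList,
                PySem.Set.ofList_cons]
            have hn : (pvNm ev ∉ s) = False := by simp [h1]
            simp only [List.filter_cons, hn, decide_false]
            have key : ((PySem.Set.discard
                  (PySem.Set.ofList ((rest.map pvNm).filter (fun n => n ≠ "")))
                  (pvNm ev)).filter (fun y => y ∉ s))
                = ((PySem.Set.ofList ((rest.map pvNm).filter (fun n => n ≠ ""))).filter
                    (fun y => y ∉ s)) := by
              rw [PySem.Set.discard, List.filter_filter]
              apply List.filter_congr
              intro y _
              by_cases hy : y ∈ s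
              · simp [hy]
              · have hyn : y ≠ pvNm ev := fun hc => hy (hc ▸ h1)
                simp [hy, hyn]
            rw [key]
            simp
        · -- new nonempty name: appended by A, kept by dedup on the other side
          rw [show pvStepA (s, out) ev
                = (PySem.Set.add s (pvNm ev), out ++ ["- " ++ pvNm ev]) by
              simp [pvStepA, h0, h1]]
          rw [ih]
          have hf : ((pvNm ev :: (rest.map pvNm)).filter (fun n => n ≠ ""))
              = pvNm ev :: ((rest.map pvNm).filter (fun n => n ≠ "")) := by
            simp [h0]
          rw [hf]
          refine Prod.ext ?_ ?_
          · simp only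
            rw [PySem.Set.update_cons]
          · simp only
            rw [PySem.List.dedup_eq_ofList, PySem.List.dedup_eq_ofList,
                PySem.Set.ofList_cons]
            have hn : (pvNm ev ∉ s) = True := by simp [h1]
            simp only [List.filter_cons, hn, decide_true, if_true, List.map_cons,
              List.append_assoc, List.singleton_append]
            have key : ((PySem.Set.ofList ((rest.map pvNm).filter (fun n => n ≠ ""))).filter
                    (fun y => y ∉ PySem.Set.add s (pvNm ev)))
                = ((PySem.Set.discard
                    (PySem.Set.ofList ((rest.map pvNm).filter (fun n => n ≠ "")))
                    (pvNm ev)).filter (fun y => y ∉ s)) := by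
              rw [PySem.Set.discard, List.filter_filter, PySem.Set.add_of_not_mem h1]
              apply (List.filter_congr _).symm
              intro y _
              by_cases hy : y ∈ s
              · simp [hy, List.mem_append]
              · by_cases hyn : y = pvNm ev
                · simp [hyn, List.mem_append]
                · simp [hy, hyn, List.mem_append]
            rw [key]

-- B's recursion, characterised: go computes the first-occurrence dedup of the nonempty cleaned names
set_option maxHeartbeats 1000000 in
theorem goB_char (lib : List (List (String × String))) :
    pvGoB lib = PySem.List.dedup ((lib.map pvNm).filter (fun n => n ≠ "")) := by
  induction lib with
  | nil => simp [pvGoB, PySem.List.dedup_eq_ofList, PySem.Set.ofList]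
  | cons ev rest ih =>
      show (if pvNm ev = "" then pvGoB rest
            else pvNm ev :: (pvGoB rest).filter (fun r => r ≠ pvNm ev)) = _
      by_cases h0 : pvNm ev = ""
      · simp [h0, ih]
      · simp only [h0, if_false, List.map_cons, List.filter_cons,
          show ((pvNm ev ≠ "")) = True by simp [h0], decide_true, if_true]
        rw [ih, PySem.List.dedup_eq_ofList, PySem.List.dedup_eq_ofList,
            PySem.Set.ofList_cons, PySem.Set.discard]
        have hpred : (fun r => decide (r ≠ pvNm ev)) = (fun y => !(y == pvNm ev)) := by
          funext y; by_cases h : y = pvNm ev <;> simp [h]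
        rw [hpred]

-- ===== VERDICT (by name: the statement is the Claim_ definition above) =====
theorem list_sources_py_spec : Claim_equal_list_sources_py := by
  intro lib _
  unfold Spec_list_sources_py list_sources_py list_sources_py_alt
  rw [show (fun (st : PySem.Set String × List String) ev =>
        let source := PySem.Dict.getD (PySem.Dict.mk ev) "source" ""
        let doc_name := PySem.Str.strip ((((PySem.Str.split? source "(").getD [])).headD "")
        if doc_name ≠ "" ∧ doc_name ∉ st.1 then
          (PySem.Set.add st.1 doc_name, st.2 ++ ["- " ++ doc_name])
        else st) = pvStepA from rfl]
  rw [show PySem.Set.empty = ([] : List String) from rfl]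
  rw [loopA_char, goB_char]
  simp only [List.not_mem_nil, not_false_eq_true, decide_true, List.filter_true, List.nil_append]
  simp [List.map_eq_nil_iff, ite_not]
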